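-- pv_equiv track=rewrite | github.com/Hugo-Vangilluwen/TIPE-Votes | simulation/ensemble.py | applications
-- ===== SOURCE A (Python) =====
-- def applications(E, F):
--     """Calcule l'ensemble des applications de E dans F sous la forme de dictionnaire."""
--     if len(E) == 0 or len(F) == 0:
--         return []
--
--     if len(E) == 1:
--         resultat = []
--         for f in F:
--             resultat.append({E[0]: f})
--         return resultat
--
--     resultat = []
--     app = applications(E[1:], F)
--
--     for f in F:
--         resultat.extend([{E[0]: f} | phi for phi in app])
--
--     return resultat
-- ===== SOURCE B (Python) =====
-- def applications(E, F):
--     """Calcule l'ensemble des applications de E dans F sous la forme de dictionnaire."""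
--     if len(E) == 0 or len(F) == 0:
--         return []
--     combos = [()]
--     for _ in E:
--         combos = [c + (f,) for c in combos for f in F]
--     return [dict(zip(E, c)) for c in combos]
-- ===== Notes on version B (the rewrite author's own statement) =====
-- stated objective: simpler
-- what changed: Replaced A's recursion on E with dict-union merging by a single iterative build of the Cartesian product F^|E| followed by dict(zip(E, combo)) per value tuple.
import Mathlib
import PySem

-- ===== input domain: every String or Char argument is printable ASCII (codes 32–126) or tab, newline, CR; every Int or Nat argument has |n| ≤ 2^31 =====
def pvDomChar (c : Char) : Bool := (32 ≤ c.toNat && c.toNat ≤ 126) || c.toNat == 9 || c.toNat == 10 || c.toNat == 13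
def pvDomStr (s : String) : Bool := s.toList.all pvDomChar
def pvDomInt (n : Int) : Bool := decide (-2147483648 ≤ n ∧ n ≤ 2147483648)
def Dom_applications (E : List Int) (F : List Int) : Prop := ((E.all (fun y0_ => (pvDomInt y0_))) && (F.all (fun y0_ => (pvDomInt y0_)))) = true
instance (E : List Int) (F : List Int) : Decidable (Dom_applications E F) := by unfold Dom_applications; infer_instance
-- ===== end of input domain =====

-- B replaces A's recursion on E by one pass over the Cartesian product F^|E|, zipping E with each value tuple (objective: simpler).

-- ===== PORT A =====
-- A recursion on E building dicts; '{E[0]: f} | phi' is the singleton dict updated with phi's items.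
def applicationsAuxA : List Int → List Int → List (PySem.Dict Int Int)
  | [], _ => []
  | _, [] => []
  | [e], F => F.map (fun f => PySem.Dict.empty.insert e f)
  | e :: rest, F =>
      F.flatMap (fun f =>
        (applicationsAuxA rest F).map (fun phi => (PySem.Dict.empty.insert e f).update phi.items))

def applications (E : List Int) (F : List Int) : List (List (Int × Int)) :=
  (applicationsAuxA E F).map (fun d => d.items)

-- ===== PORT B =====
-- guard, then combos = F^|E| built left-to-right (last coordinate fastest), then dict(zip(E, c)) per combo.
def applications_alt (E : List Int) (F : List Int) : List (List (Int × Int)) :=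
  if E.length = 0 ∨ F.length = 0 then []
  else
    let combos := E.foldl (fun cs _ => cs.flatMap (fun c => F.map (fun f => c ++ [f]))) [[]]
    combos.map (fun c => (PySem.Dict.ofList (E.zip c)).items)

-- ===== PRECONDITION & SPEC =====
def Spec_applications (E : List Int) (F : List Int) (out : List (List (Int × Int))) : Prop := out = applications_alt E F
instance (E : List Int) (F : List Int) (out : List (List (Int × Int))) : Decidable (Spec_applications E F out) := by unfold Spec_applications; infer_instance

-- ===== CLAIM (what is proved, stated in full; the proofs are below) =====
def Claim_equal_applications : Prop := ∀ (E : List Int) (F : List Int), Dom_applications E F → Spec_applications E F (applications E F)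

-- ===== LEMMAS AND PROOFS =====

-- inserting k commutes with inserting another key, provided k is already present (so it overwrites in place)
theorem pv_insert_comm (d : PySem.Dict Int Int) (k : Int) (v : Int) (a : Int) (b : Int)
    (hak : a ≠ k) (hk : d.contains k = true) :
    (d.insert a b).insert k v = (d.insert k v).insert a b := by
  have hka : (k == a) = false := by simp [Ne.symm hak]
  have h1 : (d.insert a b).contains k = true := by
    rw [PySem.Dict.contains_insert]; simp [hk]
  cases hca : d.contains a with
  | true =>
    have h2 : (d.insert k v).contains a = true := by
      rw [PySem.Dict.contains_insert]; simp [hca]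
    apply PySem.Dict.ext
    rw [PySem.Dict.items_insert_of_contains _ v h1,
        PySem.Dict.items_insert_of_contains _ b hca,
        PySem.Dict.items_insert_of_contains _ b h2,
        PySem.Dict.items_insert_of_contains _ v hk]
    simp only [List.map_map]
    apply List.map_congr_left
    intro p _
    by_cases hpa : p.1 = a <;> by_cases hpk : p.1 = k <;>
      simp_all [Function.comp]
  | false =>
    have h2 : (d.insert k v).contains a = false := by
      rw [PySem.Dict.contains_insert]; simp [hca, hak]
    apply PySem.Dict.ext
    rw [PySem.Dict.items_insert_of_contains _ v h1,
        PySem.Dict.items_insert_of_not_contains _ b hca,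
        PySem.Dict.items_insert_of_not_contains _ b h2,
        PySem.Dict.items_insert_of_contains _ v hk]
    simp [List.map_append]
    exact fun h => absurd h hak

-- updating with pairs avoiding k commutes with an in-place overwrite of k
theorem pv_update_insert_comm (qs : List (Int × Int)) (d : PySem.Dict Int Int) (k : Int) (v : Int)
    (hk : d.contains k = true) (hq : ∀ p ∈ qs, p.1 ≠ k) :
    (d.update qs).insert k v = (d.insert k v).update qs := by
  induction qs generalizing d with
  | nil => rfl
  | cons p qs ih =>
    have step : ∀ (d' : PySem.Dict Int Int), d'.update (p :: qs) = (d'.insert p.1 p.2).update qs := fun _ => rfl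
    rw [step, step]
    have hk' : (d.insert p.1 p.2).contains k = true := by
      rw [PySem.Dict.contains_insert]; simp [hk]
    rw [ih _ hk' (fun q hqm => hq q (List.mem_cons_of_mem _ hqm))]
    rw [pv_insert_comm d k v p.1 p.2 (hq p (List.mem_cons_self ..)) hk]

theorem pv_map_subst_id (qs : List (Int × Int)) (k : Int) (v : Int) (h : ∀ p ∈ qs, p.1 ≠ k) :
    qs.map (fun p => if p.1 == k then (k, v) else p) = qs := by
  induction qs with
  | nil => rfl
  | cons p qs ih =>
    simp only [List.map_cons]
    rw [if_neg (by simp [h p (List.mem_cons_self ..)]),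
        ih (fun q hq => h q (List.mem_cons_of_mem _ hq))]

theorem pv_update_subst (qs : List (Int × Int)) (d : PySem.Dict Int Int) (k : Int) (v : Int)
    (hnd : (qs.map Prod.fst).Nodup) (hmem : k ∈ qs.map Prod.fst) :
    d.update (qs.map (fun p => if p.1 == k then (k, v) else p)) = (d.update qs).insert k v := by
  induction qs generalizing d with
  | nil => simp at hmem
  | cons q qs ih =>
    by_cases hqk : q.1 = k
    · have hnotin : ∀ p ∈ qs, p.1 ≠ k := by
        intro p hp hpk
        simp only [List.map_cons, List.nodup_cons] at hnd
        exact hnd.1 (hqk ▸ hpk ▸ List.mem_map_of_mem hp)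
      have hhead : (fun p => if (p.1 == k) = true then (k, v) else p) q = (k, v) := by simp [hqk]
      have step : ∀ (d' : PySem.Dict Int Int) (x : Int × Int) (xs : List (Int × Int)),
          d'.update (x :: xs) = (d'.insert x.1 x.2).update xs := fun _ _ _ => rfl
      simp only [List.map_cons, hhead]
      rw [step, step, pv_map_subst_id qs k v hnotin,
          pv_update_insert_comm qs (d.insert q.1 q.2) k v
            (by rw [hqk]; exact PySem.Dict.contains_insert_self ..) hnotin]
      rw [hqk, PySem.Dict.insert_insert_self]
    · have hhead : (fun p => if (p.1 == k) = true then (k, v) else p) q = q := by simp [hqk]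
      simp only [List.map_cons, hhead]
      have step : ∀ (d' : PySem.Dict Int Int) (x : Int × Int) (xs : List (Int × Int)),
          d'.update (x :: xs) = (d'.insert x.1 x.2).update xs := fun _ _ _ => rfl
      rw [step, step]
      have hnd' : (qs.map Prod.fst).Nodup := by
        simp only [List.map_cons, List.nodup_cons] at hnd; exact hnd.2
      have hmem' : k ∈ qs.map Prod.fst := by
        simp only [List.map_cons, List.mem_cons] at hmem
        rcases hmem with h1 | h2
        · exact absurd h1.symm hqk
        · exact h2
      exact ih (d.insert q.1 q.2) hnd' hmem' 

theorem pv_update_items_insert (e : PySem.Dict Int Int) (d : PySem.Dict Int Int) (k : Int) (v : Int)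
    (he : e.keys.Nodup) :
    d.update (e.insert k v).items = (d.update e.items).insert k v := by
  cases hc : e.contains k with
  | true =>
    rw [PySem.Dict.items_insert_of_contains _ v hc]
    exact pv_update_subst e.items d k v he ((PySem.Dict.contains_iff_mem_keys e k).mp hc)
  | false =>
    rw [PySem.Dict.items_insert_of_not_contains _ v hc]
    simp [PySem.Dict.update, List.foldl_append]

theorem pv_update_update_items (ps : List (Int × Int)) (d e : PySem.Dict Int Int)
    (he : e.keys.Nodup) :
    d.update (e.update ps).items = (d.update e.items).update ps := by
  induction ps generalizing e with
  | nil => rfl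
  | cons p ps ih =>
    have step1 : e.update (p :: ps) = (e.insert p.1 p.2).update ps := rfl
    have step2 : (d.update e.items).update (p :: ps) = ((d.update e.items).insert p.1 p.2).update ps := rfl
    rw [step1, step2, ih (e.insert p.1 p.2) (PySem.Dict.nodup_keys_insert e p.1 p.2 he),
        pv_update_items_insert e d p.1 p.2 he]

theorem pv_update_ofList_items (ps : List (Int × Int)) (d : PySem.Dict Int Int) :
    d.update (PySem.Dict.ofList ps).items = d.update ps := by
  have h := pv_update_update_items ps d PySem.Dict.empty PySem.Dict.nodup_keys_empty
  simpa [PySem.Dict.ofList, PySem.Dict.empty, PySem.Dict.update] using h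

-- F^n with the FIRST coordinate slowest (A's recursion shape)
def pvProd (F : List Int) : Nat → List (List Int)
  | 0 => [[]]
  | n + 1 => F.flatMap (fun f => (pvProd F n).map (fun c => f :: c))

theorem pvProd_up (F : List Int) (n : Nat) :
    pvProd F (n + 1) = (pvProd F n).flatMap (fun c => F.map (fun f => c ++ [f])) := by
  induction n with
  | zero =>
    simp only [pvProd]
    induction F with
    | nil => rfl
    | cons f F ihf => simp_all
  | succ n ih =>
    show pvProd F (n + 2) = _
    have l1 : pvProd F (n + 2) = F.flatMap (fun f => (pvProd F (n + 1)).map (fun c => f :: c)) := rfl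
    have l2 : pvProd F (n + 1) = F.flatMap (fun f => (pvProd F n).map (fun c => f :: c)) := rfl
    conv_lhs => rw [l1]
    conv_lhs => rw [ih]
    conv_rhs => rw [l2]
    simp [List.map_flatMap, List.flatMap_map, List.map_map, List.flatMap_assoc, Function.comp_def]

theorem pvProd_one (F : List Int) : pvProd F 1 = F.map (fun f => [f]) := by
  simp only [pvProd]
  induction F with
  | nil => rfl
  | cons f F ih => simp_all

theorem pv_foldl_const (l : List Int) (g : List (List Int) → List (List Int)) (init : List (List Int)) :
    l.foldl (fun cs _ => g cs) (g init) = g (l.foldl (fun cs _ => g cs) init) := by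
  induction l generalizing init with
  | nil => rfl
  | cons x l ih => exact ih (g init)

theorem pv_foldl_prod (E F : List Int) :
    E.foldl (fun cs _ => cs.flatMap (fun c => F.map (fun f => c ++ [f]))) [[]] = pvProd F E.length := by
  induction E with
  | nil => rfl
  | cons e E ih =>
    show List.foldl _ ((fun cs (_ : Int) => cs.flatMap fun c => F.map fun f => c ++ [f]) [[]] e) E = _
    rw [pv_foldl_const E (fun cs => cs.flatMap fun c => F.map fun f => c ++ [f]) [[]], ih,
        List.length_cons, pvProd_up]

theorem pv_main (rest : List Int) (e : Int) (F : List Int) :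
    applicationsAuxA (e :: rest) F
      = (pvProd F (e :: rest).length).map (fun c => PySem.Dict.ofList ((e :: rest).zip c)) := by
  induction rest generalizing e with
  | nil =>
    cases F with
    | nil => rfl
    | cons f0 fs =>
      show (f0 :: fs).map (fun f => PySem.Dict.empty.insert e f) = _
      rw [show ((e :: ([] : List Int)).length) = 1 from rfl, pvProd_one]
      simp [List.map_map, PySem.Dict.ofList, PySem.Dict.update]
  | cons r rest' ih =>
    cases F with
    | nil => simp [applicationsAuxA, pvProd]
    | cons f0 fs =>
      have l1 : applicationsAuxA (e :: r :: rest') (f0 :: fs)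
          = (f0 :: fs).flatMap (fun f =>
              (applicationsAuxA (r :: rest') (f0 :: fs)).map
                (fun phi => (PySem.Dict.empty.insert e f).update phi.items)) := rfl
      have l2 : pvProd (f0 :: fs) ((e :: r :: rest').length)
          = (f0 :: fs).flatMap (fun f => (pvProd (f0 :: fs) ((r :: rest').length)).map (fun c => f :: c)) := rfl
      rw [l1, l2, ih r]
      have key : ∀ (f : Int) (c : List Int),
          (PySem.Dict.empty.insert e f).update (PySem.Dict.ofList ((r :: rest').zip c)).items
            = PySem.Dict.ofList ((e :: r :: rest').zip (f :: c)) := by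
        intro f c
        rw [pv_update_ofList_items]
        rfl
      simp only [List.map_flatMap, List.map_map, Function.comp_def]
      congr 1
      funext f
      apply List.map_congr_left
      intro c _
      exact key f c

-- ===== VERDICT (by name: the statement is the Claim_ definition above) =====
theorem applications_spec : Claim_equal_applications := by
  intro E F _hd
  show applications E F = applications_alt E F
  cases E with
  | nil => simp [applications, applicationsAuxA, applications_alt]
  | cons e rest =>
    cases F with
    | nil => simp [applications, applicationsAuxA, applications_alt]
    | cons f0 fs =>
      unfold applications applications_alt
      rw [if_neg (by simp)]
      rw [pv_foldl_prod, pv_main]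
      simp [List.map_map]
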